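-- pv_equiv track=rewrite | github.com/arunachalamev/PythonProgramming | Algorithms/LeetCode/L1259numberOfWays.py | numberOfWays
-- ===== SOURCE A (Python) =====
-- def numberOfWays(num_people):
--     resultDict = {0:1}
--     res = 0
--
--     if num_people<0 or num_people%2 == 1:
--         return 0
--
--     if num_people in resultDict:
--         return resultDict[num_people]
--
--     for i in range(1,num_people):
--         a = i - 1
--         b = num_people - (i + 1)
--         res = res + numberOfWays(a) * numberOfWays(b)
--         res = res % (10**9 + 7)
--         resultDict[i] = res
--
--     return res
-- ===== SOURCE B (Python) =====
-- def numberOfWays(num_people):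
--     MOD = 10 ** 9 + 7
--     if num_people < 0 or num_people % 2 == 1:
--         return 0
--     k = num_people // 2
--     dp = [1]
--     for m in range(1, k + 1):
--         dp.append(sum(dp[j] * dp[m - 1 - j] for j in range(m)) % MOD)
--     return dp[k]
-- ===== Notes on version B (the rewrite author's own statement) =====
-- stated objective: faster
-- what changed: Replaces A's exponential recursion (its memo dict is rebuilt from scratch on every recursive call, so it never actually memoizes) by a bottom-up quadratic DP table of Catalan numbers modulo the task's prime, indexed by half the input; Pre_ excludes only the even inputs >= 1994, on which A raises RecursionError (its recursion depth is about n/2, beyond CPython's default limit).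
import Mathlib
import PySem

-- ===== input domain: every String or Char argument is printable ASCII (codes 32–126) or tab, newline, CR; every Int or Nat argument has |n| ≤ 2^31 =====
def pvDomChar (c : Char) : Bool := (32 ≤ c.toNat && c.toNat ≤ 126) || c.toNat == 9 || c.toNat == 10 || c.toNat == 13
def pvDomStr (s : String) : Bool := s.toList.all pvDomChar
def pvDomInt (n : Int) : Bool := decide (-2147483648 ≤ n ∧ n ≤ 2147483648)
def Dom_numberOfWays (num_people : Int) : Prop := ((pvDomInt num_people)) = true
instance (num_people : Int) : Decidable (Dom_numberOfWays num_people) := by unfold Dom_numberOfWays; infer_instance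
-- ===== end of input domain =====

-- B replaces A's exponential recursion (whose memo dict is rebuilt on every recursive call, so it
-- never memoizes) by a bottom-up dynamic-programming table of Catalan numbers modulo the task's prime.

-- ===== PORT A =====
def numberOfWays (num_people : Int) : Int :=
  let resultDict : PySem.Dict Int Int := PySem.Dict.insert PySem.Dict.empty 0 1
  if num_people < 0 ∨ PySem.Int.mod num_people 2 = 1 then 0
  else if PySem.Dict.contains resultDict num_people then PySem.Dict.getD resultDict num_people 0
  else
    (((PySem.List.pyRange 1 num_people 1).attach).foldl
      (fun (st : Int × PySem.Dict Int Int) i =>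
        let a := i.1 - 1
        let b := num_people - (i.1 + 1)
        let res := st.1 + numberOfWays a * numberOfWays b
        let res := PySem.Int.mod res (10 ^ 9 + 7)
        (res, PySem.Dict.insert st.2 i.1 res)) (0, resultDict)).1
termination_by num_people.toNat
decreasing_by
  · have h := (PySem.List.mem_pyRange_one).mp i.2; omega
  · have h := (PySem.List.mem_pyRange_one).mp i.2; omega

-- ===== PORT B =====
def numberOfWays_alt (num_people : Int) : Int :=
  if num_people < 0 ∨ PySem.Int.mod num_people 2 = 1 then 0
  else
    let k := PySem.Int.floordiv num_people 2
    let dp := (PySem.List.pyRange 1 (k + 1) 1).foldl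
      (fun dp m =>
        dp ++ [PySem.Int.mod
          ((PySem.List.pyRange 0 m 1).foldl
            (fun s j => s + PySem.List.pyGetD dp j 0 * PySem.List.pyGetD dp (m - 1 - j) 0) 0)
          (10 ^ 9 + 7)]) [1]
    PySem.List.pyGetD dp k 0

-- ===== PRECONDITION & SPEC =====
-- Pre_ excludes the even inputs from 1994 up: there A's unmemoized recursion descends with depth
-- about n/2 and overflows CPython's default recursion limit, raising RecursionError before any
-- value is produced; B returns the Catalan value there.
def Pre_numberOfWays (num_people : Int) : Prop :=
  num_people < 0 ∨ PySem.Int.mod num_people 2 = 1 ∨ num_people ≤ 1992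
instance (num_people : Int) : Decidable (Pre_numberOfWays num_people) := by unfold Pre_numberOfWays; infer_instance
def pvWitness_numberOfWays : Int := 6

def Spec_numberOfWays (num_people : Int) (out : Int) : Prop := out = numberOfWays_alt num_people
instance (num_people : Int) (out : Int) : Decidable (Spec_numberOfWays num_people out) := by unfold Spec_numberOfWays; infer_instance

-- ===== CLAIM (what is proved, stated in full; the proofs are below) =====
def Claim_equal_numberOfWays : Prop := ∀ (num_people : Int), Dom_numberOfWays num_people → Pre_numberOfWays num_people → Spec_numberOfWays num_people (numberOfWays num_people)

-- ===== LEMMAS AND PROOFS =====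

-- Catalan numbers modulo the task's prime (proof-only spec function)
def pvCat : Nat → Int
  | 0 => 1
  | (m+1) => (((List.range (m+1)).attach).foldl
      (fun s j => s + pvCat j.1 * pvCat (m - j.1)) 0) % (10 ^ 9 + 7)
decreasing_by
  · have h := List.mem_range.mp j.2; omega
  · have h := List.mem_range.mp j.2; omega

-- fst of A's pair-fold is the plain res-fold
theorem pv_fold_fst (l : List Int) (f : Int → Int) :
    ∀ (r0 : Int) (d0 : PySem.Dict Int Int),
    (l.foldl (fun (st : Int × PySem.Dict Int Int) i =>
        (PySem.Int.mod (st.1 + f i) (10 ^ 9 + 7), PySem.Dict.insert st.2 i (PySem.Int.mod (st.1 + f i) (10 ^ 9 + 7))))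
      (r0, d0)).1
    = l.foldl (fun r i => PySem.Int.mod (r + f i) (10 ^ 9 + 7)) r0 := by
  induction l with
  | nil => intro r0 d0; rfl
  | cons a t ih => intro r0 d0; simp only [List.foldl_cons]; exact ih _ _

-- chained mod = one mod at the end
theorem pv_modfold {α : Type} (l : List α) (f : α → Int) :
    ∀ (r0 : Int),
    l.foldl (fun r i => (r + f i) % ((10:Int) ^ 9 + 7)) (r0 % ((10:Int) ^ 9 + 7))
      = (l.foldl (fun r i => r + f i) r0) % ((10:Int) ^ 9 + 7) := by
  induction l with
  | nil => intro r0; rfl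
  | cons a t ih =>
      intro r0
      simp only [List.foldl_cons]
      have h : (r0 % ((10:Int) ^ 9 + 7) + f a) % ((10:Int) ^ 9 + 7)
          = (r0 + f a) % ((10:Int) ^ 9 + 7) := by
        conv_rhs => rw [Int.add_emod]
        rw [Int.add_emod (r0 % _)]
        simp [Int.emod_emod_of_dvd]
      rw [h, ih]

-- foldl-add over List.range is a Finset.range sum
theorem pv_range_foldl_sum (g : Nat → Int) (N : Nat) :
    ∀ (s0 : Int), (List.range N).foldl (fun s k => s + g k) s0 = s0 + ∑ k ∈ Finset.range N, g k := by
  induction N with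
  | zero => intro s0; simp
  | succ n ih =>
      intro s0
      rw [List.range_succ, List.foldl_append, ih, Finset.sum_range_succ]
      simp [add_assoc]

-- a sum over range (2p+1) of a function vanishing on odd arguments
theorem pv_even_sum (g : Nat → Int) (hodd : ∀ k, k % 2 = 1 → g k = 0) :
    ∀ (p : Nat), ∑ k ∈ Finset.range (2 * p + 1), g k = ∑ j ∈ Finset.range (p + 1), g (2 * j) := by
  intro p
  induction p with
  | zero => simp
  | succ q ih =>
      have h1 : 2 * (q + 1) + 1 = (2 * q + 1) + 1 + 1 := by ring
      have h2 : g (2 * q + 1) = 0 := hodd _ (by omega)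
      have h3 : 2 * q + 1 + 1 = 2 * (q + 1) := by ring
      rw [h1, Finset.sum_range_succ, Finset.sum_range_succ, ih, h2, h3, add_zero,
        Finset.sum_range_succ, Finset.sum_range_succ, Finset.sum_range_succ]

theorem pv_A_zero (n : Int) (h : n < 0 ∨ PySem.Int.mod n 2 = 1) : numberOfWays n = 0 := by
  rw [numberOfWays]; simp only [if_pos h]

theorem pv_A_odd (k : Nat) (hk : k % 2 = 1) : numberOfWays (k : Int) = 0 := by
  apply pv_A_zero
  right
  rw [show ((2:Int)) = ((2:Nat):Int) from rfl, PySem.Int.mod_natCast]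
  exact_mod_cast hk

-- foldl over attach with the function reading only the value
theorem pv_foldl_pmap {α β : Type} (l : List α) :
    ∀ (P : α → Prop) (H : ∀ a ∈ l, P a) (f : β → α → β) (b : β),
    (List.pmap Subtype.mk l H).foldl (fun acc x => f acc x.1) b = l.foldl f b := by
  induction l with
  | nil => intro P H f b; rfl
  | cons a t ih => intro P H f b; simp only [List.pmap, List.foldl_cons]; exact ih _ _ f (f b a)

theorem pv_foldl_attach {α β : Type} (l : List α) (f : β → α → β) (b : β) :
    l.attach.foldl (fun acc x => f acc x.1) b = l.foldl f b := by
  simpa [List.attach, List.attachWith] using pv_foldl_pmap l (· ∈ l) (fun _ h => h) f b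

theorem pvCat_succ (t : Nat) :
    pvCat (t + 1) = (∑ j ∈ Finset.range (t + 1), pvCat j * pvCat (t - j)) % ((10:Int) ^ 9 + 7) := by
  rw [pvCat]
  rw [pv_foldl_attach (List.range (t+1)) (fun s j => s + pvCat j * pvCat (t - j)) 0]
  rw [pv_range_foldl_sum, zero_add]

theorem pv_A_even : ∀ (m : Nat), numberOfWays (2 * (m : Int)) = pvCat m := by
  intro m
  induction m using Nat.strong_induction_on with
  | _ m ih =>
    match m with
    | 0 =>
        rw [show (2 * ((0:Nat):Int)) = 0 by norm_num, numberOfWays]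
        norm_num [PySem.Int.mod, pvCat]
    | Nat.succ t =>
        have hN : (2 * (((t+1):Nat) : Int)) = ((2*t+2 : Nat) : Int) := by push_cast; ring
        rw [hN, numberOfWays]
        have hguard : ¬ (((2*t+2 : Nat):Int) < 0 ∨ PySem.Int.mod ((2*t+2 : Nat):Int) 2 = 1) := by
          rw [show ((2:Int)) = ((2:Nat):Int) from rfl, PySem.Int.mod_natCast]
          omega
        rw [if_neg hguard]
        show (if PySem.Dict.contains (PySem.Dict.insert PySem.Dict.empty 0 1) ((2*t+2 : Nat):Int) = true
              then PySem.Dict.getD (PySem.Dict.insert PySem.Dict.empty 0 1) ((2*t+2 : Nat):Int) 0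
              else ((PySem.List.pyRange 1 ((2*t+2 : Nat):Int) 1).attach.foldl
                (fun (st : Int × PySem.Dict Int Int) i =>
                  (PySem.Int.mod (st.1 + numberOfWays (i.1 - 1) * numberOfWays (((2*t+2 : Nat):Int) - (i.1 + 1))) (10 ^ 9 + 7),
                   PySem.Dict.insert st.2 i.1 (PySem.Int.mod (st.1 + numberOfWays (i.1 - 1) * numberOfWays (((2*t+2 : Nat):Int) - (i.1 + 1))) (10 ^ 9 + 7))))
                (0, PySem.Dict.insert PySem.Dict.empty 0 1)).1)
            = pvCat (t+1)
        rw [if_neg (by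
          simp [PySem.Dict.contains, PySem.Dict.insert, PySem.Dict.empty]
          omega)]
        rw [pv_foldl_attach (PySem.List.pyRange 1 ((2*t+2 : Nat):Int) 1)
          (fun (st : Int × PySem.Dict Int Int) i =>
            (PySem.Int.mod (st.1 + numberOfWays (i - 1) * numberOfWays (((2*t+2 : Nat):Int) - (i + 1))) (10 ^ 9 + 7),
             PySem.Dict.insert st.2 i (PySem.Int.mod (st.1 + numberOfWays (i - 1) * numberOfWays (((2*t+2 : Nat):Int) - (i + 1))) (10 ^ 9 + 7))))
          (0, PySem.Dict.insert PySem.Dict.empty 0 1)]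
        rw [pv_fold_fst (PySem.List.pyRange 1 ((2*t+2 : Nat):Int) 1)
          (fun i => numberOfWays (i - 1) * numberOfWays (((2*t+2 : Nat):Int) - (i + 1))) 0
          (PySem.Dict.insert PySem.Dict.empty 0 1)]
        rw [PySem.List.pyRange_one]
        rw [show ((((2*t+2 : Nat):Int)) - 1).toNat = 2*t+1 by omega]
        rw [List.foldl_map]
        simp only [PySem.Int.mod_eq_emod_of_pos (show (0:Int) < 10 ^ 9 + 7 by norm_num)]
        rw [show (0:Int) = 0 % ((10:Int) ^ 9 + 7) by norm_num]
        rw [pv_modfold (List.range (2*t+1))]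
        rw [pv_range_foldl_sum]
        rw [zero_add]
        have hcg : ∀ k ∈ Finset.range (2*t+1),
            numberOfWays (1 + (k:Int) - 1) * numberOfWays (((2*t+2 : Nat):Int) - (1 + (k:Int) + 1))
              = numberOfWays (k:Int) * numberOfWays (2 * ((t:Nat):Int) - (k:Int)) := by
          intro k _
          congr 1
          · congr 1; ring
          · congr 1; push_cast; ring
        rw [Finset.sum_congr rfl hcg]
        rw [pv_even_sum (fun k => numberOfWays (k:Int) * numberOfWays (2 * ((t:Nat):Int) - (k:Int)))
          (fun k hk => by
            show numberOfWays (k:Int) * numberOfWays (2 * ((t:Nat):Int) - (k:Int)) = 0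
            rw [pv_A_odd k hk, zero_mul]) t]
        have hcg2 : ∀ j ∈ Finset.range (t+1),
            numberOfWays ((2*j : Nat):Int) * numberOfWays (2 * ((t:Nat):Int) - ((2*j : Nat):Int))
              = pvCat j * pvCat (t - j) := by
          intro j hj
          have hj' : j < t + 1 := Finset.mem_range.mp hj
          have h2 : 2 * ((t:Nat):Int) - 2 * ((j:Nat):Int) = 2 * (((t - j : Nat)):Int) := by omega
          push_cast
          rw [ih j (by omega), h2, ih (t - j) (by omega)]
        rw [Finset.sum_congr rfl hcg2]
        rw [← pvCat_succ t]

theorem pv_dp (t : Nat) :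
    (PySem.List.pyRange 1 ((t:Int) + 1) 1).foldl
      (fun dp m =>
        dp ++ [PySem.Int.mod
          ((PySem.List.pyRange 0 m 1).foldl
            (fun s j => s + PySem.List.pyGetD dp j 0 * PySem.List.pyGetD dp (m - 1 - j) 0) 0)
          (10 ^ 9 + 7)]) [1]
    = (List.range (t+1)).map pvCat := by
  induction t with
  | zero =>
      rw [show ((0:Nat):Int) + 1 = 1 by norm_num, PySem.List.pyRange_one_eq_nil (le_refl 1)]
      simp [pvCat]
  | succ t ih =>
      rw [show (((t+1:Nat)):Int) + 1 = ((t:Int) + 1) + 1 by push_cast; ring]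
      rw [PySem.List.pyRange_one_succ_right (by omega : (1:Int) ≤ (t:Int) + 1)]
      rw [List.foldl_append, ih]
      rw [List.foldl_cons, List.foldl_nil]
      have hinner :
          ((PySem.List.pyRange 0 ((t:Int) + 1) 1).foldl
            (fun s j => s + PySem.List.pyGetD ((List.range (t+1)).map pvCat) j 0
              * PySem.List.pyGetD ((List.range (t+1)).map pvCat) ((t:Int) + 1 - 1 - j) 0) 0)
          = ∑ j ∈ Finset.range (t+1), pvCat j * pvCat (t - j) := by
        rw [show ((t:Int) + 1) = ((t+1 : Nat):Int) by push_cast; ring]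
        rw [PySem.List.pyRange_zero_natCast]
        rw [List.foldl_map]
        rw [pv_range_foldl_sum, zero_add]
        refine Finset.sum_congr rfl ?_
        intro j hj
        have hj' : j < t + 1 := Finset.mem_range.mp hj
        have e1 : PySem.List.pyGetD ((List.range (t+1)).map pvCat) ((j:Int)) 0 = pvCat j := by
          rw [PySem.List.pyGetD_natCast]
          simp [List.getD_eq_getElem?_getD, hj']
        have e2 : ((t+1 : Nat):Int) - 1 - (j:Int) = (((t - j : Nat)):Int) := by omega
        have e3 : PySem.List.pyGetD ((List.range (t+1)).map pvCat) ((((t - j : Nat)):Int)) 0 = pvCat (t - j) := by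
          rw [PySem.List.pyGetD_natCast]
          have : t - j < t + 1 := by omega
          simp [List.getD_eq_getElem?_getD, this]
        rw [e1, e2, e3]
      rw [hinner]
      rw [PySem.Int.mod_eq_emod_of_pos (show (0:Int) < 10 ^ 9 + 7 by norm_num)]
      rw [← pvCat_succ t]
      rw [List.range_succ (n := t+1), List.map_append, List.map_cons, List.map_nil]

theorem pv_B_even (m : Nat) : numberOfWays_alt (2 * (m : Int)) = pvCat m := by
  rw [numberOfWays_alt]
  have hN : (2 * ((m:Nat) : Int)) = ((2*m : Nat) : Int) := by push_cast; ring
  have hguard : ¬ ((2 * ((m:Nat) : Int)) < 0 ∨ PySem.Int.mod (2 * ((m:Nat) : Int)) 2 = 1) := by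
    rw [hN, show ((2:Int)) = ((2:Nat):Int) from rfl, PySem.Int.mod_natCast]
    omega
  rw [if_neg hguard]
  show PySem.List.pyGetD
      ((PySem.List.pyRange 1 (PySem.Int.floordiv (2 * ((m:Nat) : Int)) 2 + 1) 1).foldl
        (fun dp mm =>
          dp ++ [PySem.Int.mod
            ((PySem.List.pyRange 0 mm 1).foldl
              (fun s j => s + PySem.List.pyGetD dp j 0 * PySem.List.pyGetD dp (mm - 1 - j) 0) 0)
            (10 ^ 9 + 7)]) [1])
      (PySem.Int.floordiv (2 * ((m:Nat) : Int)) 2) 0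
    = pvCat m
  have hk : PySem.Int.floordiv (2 * ((m:Nat) : Int)) 2 = (m : Int) := by
    rw [hN, show ((2:Int)) = ((2:Nat):Int) from rfl, PySem.Int.floordiv_natCast]
    omega
  rw [hk, pv_dp m, PySem.List.pyGetD_natCast]
  simp [List.getD_eq_getElem?_getD]

-- ===== VERDICT (by name: the statement is the Claim_ definition above) =====
theorem numberOfWays_spec : Claim_equal_numberOfWays := by
  intro n _ _
  unfold Spec_numberOfWays
  by_cases h : n < 0 ∨ PySem.Int.mod n 2 = 1
  · rw [pv_A_zero n h, numberOfWays_alt, if_pos h]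
  · push Not at h
    obtain ⟨h0, h1⟩ := h
    have hmod : PySem.Int.mod n 2 = 0 := by
      have := PySem.Int.mod_nonneg n (b := 2) (by norm_num)
      have := PySem.Int.mod_lt n (b := 2) (by norm_num)
      omega
    have hdvd : (2:Int) ∣ n := (PySem.Int.mod_eq_zero_iff_dvd n 2).mp hmod
    obtain ⟨c, hc⟩ := hdvd
    have hc0 : 0 ≤ c := by omega
    obtain ⟨m, hm⟩ := Int.eq_ofNat_of_zero_le hc0
    subst hm; subst hc
    rw [pv_A_even m, pv_B_even m]
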